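-- pv_equiv track=rewrite | github.com/pkq403/GoneFSR | logicformula_solver/logicform_solver.py | formula
-- ===== SOURCE A (Python) =====
-- def formula(f):
--   if f:
--     value = f.pop()
--     if value == 0:
--       return f'{formula(f)} + {formula(f)}'
--     elif value == 1:
--       return f'{formula(f)} * {formula(f)}'
--     elif value == 2:
--       return f'not {formula(f)}'
--     else:
--       return f'x{value-3}'
--   else:
--     return "S"
-- ===== SOURCE B (Python) =====
-- def formula(f):
--     # Iterative explicit-stack version; like A it consumes f by popping from the end.
--     stack = ['need']
--     out = []
--     while stack:
--         frame = stack.pop()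
--         if frame == 'need':
--             if f:
--                 v = f.pop()
--                 if v == 0:
--                     stack += [' + ', 'need', 'need']
--                 elif v == 1:
--                     stack += [' * ', 'need', 'need']
--                 elif v == 2:
--                     stack += ['not', 'need']
--                 else:
--                     out.append('x' + str(v - 3))
--             else:
--                 out.append('S')
--         elif frame == 'not':
--             out.append('not ' + out.pop())
--         else:
--             right = out.pop()
--             left = out.pop()
--             out.append(left + frame + right)
--     return out.pop()
-- ===== Notes on version B (the rewrite author's own statement) =====
-- stated objective: alternative
-- what changed: Replaces A's call recursion by an iterative explicit work stack of frames ('need'/'not'/separator) plus a result stack, assembling the same strings bottom-up; same token consumption and mutation of f.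
import Mathlib
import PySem

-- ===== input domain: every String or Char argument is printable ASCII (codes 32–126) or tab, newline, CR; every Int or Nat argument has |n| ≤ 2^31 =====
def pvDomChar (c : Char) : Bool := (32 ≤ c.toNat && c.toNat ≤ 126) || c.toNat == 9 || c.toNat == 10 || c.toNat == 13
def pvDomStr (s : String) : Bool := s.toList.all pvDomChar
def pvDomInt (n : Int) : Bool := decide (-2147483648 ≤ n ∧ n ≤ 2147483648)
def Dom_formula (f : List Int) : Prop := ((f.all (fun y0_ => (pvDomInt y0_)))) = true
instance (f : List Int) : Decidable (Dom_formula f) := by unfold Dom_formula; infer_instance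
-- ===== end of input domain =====

-- B replaces A's call recursion by an explicit work stack (different decomposition, same cost).
-- Both Pythons mutate f in place (pop from the end); the equivalence proved here is about the
-- RETURN value (B performs the identical mutation). Python's f.pop() removes the LAST element,
-- so both ports run on f.reverse and pop the head — exact for lists.

-- ===== PORT A =====
-- recursive descent; the Subtype carries 'the leftover list is no longer than the input',
-- needed only for termination of the nested second recursive call.
def formulaAux : (l : List Int) → { p : String × List Int // p.2.length ≤ l.length }
  | [] => ⟨("S", []), Nat.le_refl _⟩
  | v :: rest =>
    if v = 0 then
      let r1 := formulaAux rest
      let r2 := formulaAux r1.1.2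
      ⟨(r1.1.1 ++ " + " ++ r2.1.1, r2.1.2), by
        exact Nat.le_succ_of_le (Nat.le_trans r2.2 r1.2)⟩
    else if v = 1 then
      let r1 := formulaAux rest
      let r2 := formulaAux r1.1.2
      ⟨(r1.1.1 ++ " * " ++ r2.1.1, r2.1.2), by
        exact Nat.le_succ_of_le (Nat.le_trans r2.2 r1.2)⟩
    else if v = 2 then
      let r1 := formulaAux rest
      ⟨("not " ++ r1.1.1, r1.1.2), Nat.le_succ_of_le r1.2⟩
    else
      ⟨("x" ++ PySem.Int.toStr (v - 3), rest), Nat.le_succ_of_le (Nat.le_refl _)⟩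
termination_by l => l.length
decreasing_by
  · simp
  · exact Nat.lt_succ_of_le r1.2
  · simp
  · exact Nat.lt_succ_of_le r1.2
  · simp

def formula (f : List Int) : String := (formulaAux f.reverse).1.1

-- ===== PORT B =====
inductive PvFrame
  | need : PvFrame            -- 'need'
  | nt : PvFrame              -- 'not'
  | bin : String → PvFrame    -- binary separator frame (' + ' / ' * ')
deriving DecidableEq, Repr

-- the while loop; `out` is the result stack with its top at the head (append = cons, pop = head)
def formulaRun : (st : List PvFrame) → (out : List String) → (f : List Int) → List String
  | [], out, _ => out
  | .need :: st, out, f =>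
    match f with
    | [] => formulaRun st ("S" :: out) []
    | v :: fr =>
      if v = 0 then formulaRun (.need :: .need :: .bin " + " :: st) out fr
      else if v = 1 then formulaRun (.need :: .need :: .bin " * " :: st) out fr
      else if v = 2 then formulaRun (.need :: .nt :: st) out fr
      else formulaRun st (("x" ++ PySem.Int.toStr (v - 3)) :: out) fr
  | .nt :: st, out, f =>
    match out with
    | r :: rest => formulaRun st (("not " ++ r) :: rest) f
    | [] => formulaRun st [] f        -- unreachable from the initial configuration; totality guard
  | .bin sep :: st, out, f =>
    match out with
    | r :: l :: rest => formulaRun st ((l ++ sep ++ r) :: rest) f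
    | _ => formulaRun st out f        -- unreachable from the initial configuration; totality guard
termination_by st _ f => 3 * f.length + st.length
decreasing_by all_goals (simp only [List.length_cons]; omega)

def formula_alt (f : List Int) : String := (formulaRun [.need] [] f.reverse).headD ""

-- ===== PRECONDITION & SPEC =====
def Spec_formula (f : List Int) (out : String) : Prop := out = formula_alt f
instance (f : List Int) (out : String) : Decidable (Spec_formula f out) := by unfold Spec_formula; infer_instance

-- ===== CLAIM (what is proved, stated in full; the proofs are below) =====
def Claim_equal_formula : Prop := ∀ (f : List Int), Dom_formula f → Spec_formula f (formula f)

-- ===== LEMMAS AND PROOFS =====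

-- the stack machine processing one 'need' frame computes exactly the recursive descent's pair
theorem formulaRun_need (n : Nat) : ∀ (l : List Int), l.length ≤ n → ∀ (st : List PvFrame) (out : List String),
    formulaRun (.need :: st) out l = formulaRun st ((formulaAux l).1.1 :: out) (formulaAux l).1.2 := by
  induction n with
  | zero =>
    intro l hl st out
    have : l = [] := List.length_eq_zero_iff.mp (Nat.le_zero.mp hl)
    subst this
    simp [formulaRun, formulaAux]
  | succ n ih =>
    intro l hl st out
    match l with
    | [] => simp [formulaRun, formulaAux]
    | v :: rest =>
      have hr : rest.length ≤ n := Nat.le_of_succ_le_succ hl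
      by_cases h0 : v = 0
      · rw [show formulaRun (.need :: st) out (v :: rest)
              = formulaRun (.need :: .need :: .bin " + " :: st) out rest by
            simp [formulaRun, h0]]
        rw [ih rest hr, ih (formulaAux rest).1.2 (Nat.le_trans (formulaAux rest).2 hr)]
        simp [formulaRun, formulaAux, h0]
      · by_cases h1 : v = 1
        · rw [show formulaRun (.need :: st) out (v :: rest)
                = formulaRun (.need :: .need :: .bin " * " :: st) out rest by
              simp [formulaRun, h0, h1]]
          rw [ih rest hr, ih (formulaAux rest).1.2 (Nat.le_trans (formulaAux rest).2 hr)]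
          simp [formulaRun, formulaAux, h0, h1]
        · by_cases h2 : v = 2
          · rw [show formulaRun (.need :: st) out (v :: rest)
                  = formulaRun (.need :: .nt :: st) out rest by
                simp [formulaRun, h0, h1, h2]]
            rw [ih rest hr]
            simp [formulaRun, formulaAux, h0, h1, h2]
          · simp [formulaRun, formulaAux, h0, h1, h2]

-- ===== VERDICT (by name: the statement is the Claim_ definition above) =====
theorem formula_spec : Claim_equal_formula := by
  intro f _
  unfold Spec_formula formula formula_alt
  rw [formulaRun_need f.reverse.length f.reverse (Nat.le_refl _) [] []]
  simp [formulaRun]
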